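-- pv_equiv track=rewrite | github.com/EsosaOrumwese/fraud-detection-system | src/fraud_detection/label_store/observability.py | _render_sql
-- ===== SOURCE A (Python) =====
-- def _render_sql(sql: str, backend: str) -> str:
--     rendered = sql
--     if backend == "postgres":
--         for idx in range(1, 21):
--             rendered = rendered.replace(f"{{p{idx}}}", f"${idx}")
--     else:
--         for idx in range(1, 21):
--             rendered = rendered.replace(f"{{p{idx}}}", "?")
--     return rendered
-- ===== SOURCE B (Python) =====
-- def _render_sql(sql: str, backend: str) -> str:
--     # single left-to-right scan instead of twenty replace passes
--     valid = {str(i) for i in range(1, 21)}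
--     pg = backend == "postgres"
--     out = []
--     i, n = 0, len(sql)
--     while i < n:
--         if sql[i] == "{" and i + 1 < n and sql[i + 1] == "p":
--             j = i + 2
--             while j < n and sql[j].isdigit():
--                 j += 1
--             if j > i + 2 and j < n and sql[j] == "}":
--                 ds = sql[i + 2:j]
--                 if ds in valid:
--                     out.append("$" + ds if pg else "?")
--                 else:
--                     out.append(sql[i:j + 1])
--                 i = j + 1
--                 continue
--         out.append(sql[i])
--         i += 1
--     return "".join(out)
-- ===== Notes on version B (the rewrite author's own statement) =====
-- stated objective: alternative
-- what changed: A makes twenty sequential str.replace passes (one per placeholder token {p1}..{p20}); B makes a single left-to-right scan that parses each '{p<digits>}' group once and substitutes the backend marker when the digit string is one of str(1)..str(20).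
import Mathlib
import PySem

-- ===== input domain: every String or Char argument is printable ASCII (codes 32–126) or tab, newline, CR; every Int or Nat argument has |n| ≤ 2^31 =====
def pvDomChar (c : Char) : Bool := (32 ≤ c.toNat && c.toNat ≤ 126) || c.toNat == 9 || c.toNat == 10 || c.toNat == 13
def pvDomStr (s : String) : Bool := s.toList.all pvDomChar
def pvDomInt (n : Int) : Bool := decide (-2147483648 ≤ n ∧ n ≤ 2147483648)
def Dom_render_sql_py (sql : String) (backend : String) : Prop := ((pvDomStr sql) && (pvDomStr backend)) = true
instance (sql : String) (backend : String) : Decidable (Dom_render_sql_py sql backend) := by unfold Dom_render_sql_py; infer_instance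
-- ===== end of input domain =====

-- B replaces A's twenty sequential .replace passes by a single left-to-right scan of the string (objective: alternative/simpler traversal); same return value.

-- ===== PORT A =====
-- A: rendered = sql; for idx in range(1, 21): rendered = rendered.replace("{p"+str(idx)+"}", marker)
def render_sql_py (sql : String) (backend : String) : String :=
  if backend = "postgres" then
    List.foldl (fun rendered idx =>
        PySem.Str.replace rendered
          (String.ofList ('{' :: 'p' :: PySem.Int.toChars idx ++ ['}']))
          (String.ofList ('$' :: PySem.Int.toChars idx)))
      sql (PySem.List.pyRange 1 21 1)
  else
    List.foldl (fun rendered idx =>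
        PySem.Str.replace rendered
          (String.ofList ('{' :: 'p' :: PySem.Int.toChars idx ++ ['}']))
          "?")
      sql (PySem.List.pyRange 1 21 1)

-- ===== PORT B =====
-- B: one scan; at "{p" take the digit run, require "}" and membership of the digit string in {str(1),…,str(20)}
def scanB (pg : Bool) (s : List Char) : List Char :=
  match s with
  | [] => []
  | c :: t =>
    if c = '{' ∧ t.head? = some 'p' then
      let r := t.tail
      let ds := r.takeWhile PySem.Chars.isdigit
      if ds ≠ [] ∧ (r.drop ds.length).head? = some '}' then
        (if ds ∈ (PySem.List.pyRange 1 21 1).map PySem.Int.toChars then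
           (if pg then '$' :: ds else ['?'])
         else '{' :: 'p' :: (ds ++ ['}'])) ++ scanB pg (r.drop ds.length).tail
      else c :: scanB pg t
    else c :: scanB pg t
termination_by s.length
decreasing_by
  · simp only [List.length_cons]
    simp only [List.length_tail, List.length_drop]
    omega
  · simp
  · simp

def render_sql_py_alt (sql : String) (backend : String) : String :=
  String.ofList (scanB (backend == "postgres") sql.toList)

-- ===== PRECONDITION & SPEC =====
def Spec_render_sql_py (sql : String) (backend : String) (out : String) : Prop := out = render_sql_py_alt sql backend
instance (sql : String) (backend : String) (out : String) : Decidable (Spec_render_sql_py sql backend out) := by unfold Spec_render_sql_py; infer_instance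

-- ===== CLAIM (what is proved, stated in full; the proofs are below) =====
def Claim_equal_render_sql_py : Prop := ∀ (sql : String) (backend : String), Dom_render_sql_py sql backend → Spec_render_sql_py sql backend (render_sql_py sql backend)

-- ===== LEMMAS AND PROOFS =====

def pvRep (old new : List Char) (s : List Char) : List Char :=
  match s with
  | [] => []
  | c :: t =>
    if old.isPrefixOf (c :: t) then new ++ pvRep old new (t.drop (old.length - 1))
    else c :: pvRep old new t
termination_by s.length
decreasing_by
  · simp only [List.length_cons, List.length_drop]; omega
  · simp

theorem pvRep_go_eq (old new : List Char) (hold : old ≠ []) :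
    ∀ (fuel : Nat) (l acc : List Char), l.length ≤ fuel →
      PySem.Chars.replace.go old new fuel l acc = acc.reverse ++ pvRep old new l := by
  intro fuel
  induction fuel with
  | zero =>
    intro l acc h
    have : l = [] := by cases l <;> simp_all
    subst this
    simp [PySem.Chars.replace.go, pvRep]
  | succ n ih =>
    intro l acc h
    cases l with
    | nil => simp [PySem.Chars.replace.go, pvRep]
    | cons c t =>
      rw [PySem.Chars.replace.go]
      by_cases hp : old.isPrefixOf (c :: t)
      · rw [if_pos hp, pvRep, if_pos hp]
        have holen : 1 ≤ old.length := by cases old <;> simp_all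
        have hlen : (List.drop old.length (c :: t)).length ≤ n := by
          simp only [List.length_drop, List.length_cons] at *
          omega
        rw [ih _ _ hlen]
        have : List.drop old.length (c :: t) = t.drop (old.length - 1) := by
          cases old with
          | nil => simp_all
          | cons o os => simp
        rw [this]
        simp
      · rw [if_neg hp, pvRep, if_neg hp]
        have : t.length ≤ n := by simp at h; omega
        rw [ih _ _ this]
        simp

theorem replace_eq_pvRep (old new s : List Char) (h : old ≠ []) :
    PySem.Chars.replace s old new = pvRep old new s := by
  rw [PySem.Chars.replace]
  rw [if_neg (by simp [h])]
  simpa using pvRep_go_eq old new h s.length s [] le_rfl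

theorem pvRep_cons_not (old new : List Char) (c : Char) (t : List Char)
    (h : ¬ old <+: (c :: t)) : pvRep old new (c :: t) = c :: pvRep old new t := by
  rw [pvRep, if_neg (by simpa [List.isPrefixOf_iff_prefix] using h)]

theorem pvRep_match (old new v : List Char) (h : old ≠ []) :
    pvRep old new (old ++ v) = new ++ pvRep old new v := by
  cases old with
  | nil => simp_all
  | cons o os =>
    rw [List.cons_append, pvRep, if_pos (by simp [List.isPrefixOf_iff_prefix])]
    simp

theorem pvRep_peel (old new : List Char) (h : old.head? = some '{') :
    ∀ (w v : List Char), (∀ c ∈ w, c ≠ '{') →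
      pvRep old new (w ++ v) = w ++ pvRep old new v := by
  intro w
  induction w with
  | nil => simp
  | cons c w' ih =>
    intro v hw
    have hne : ¬ old <+: (c :: (w' ++ v)) := by
      intro hpre
      cases old with
      | nil => simp at h
      | cons o os =>
        obtain ⟨rfl, -⟩ := List.cons_prefix_cons.mp hpre
        have := hw o (by simp)
        simp at h
        exact this h
    rw [List.cons_append, pvRep_cons_not _ _ _ _ hne, ih v (fun x hx => hw x (by simp [hx]))]
    simp

theorem pvRep_prefix_rev (old new : List Char)
    (hnew : new.head? = some '$' ∨ new.head? = some '?') :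
    ∀ (v w : List Char), (∀ c ∈ w, c ≠ '$' ∧ c ≠ '?') →
      w <+: pvRep old new v → w <+: v := by
  intro v
  induction v with
  | nil =>
    intro w hw hp
    simpa [pvRep] using hp
  | cons c t ih =>
    intro w hw hp
    rw [pvRep] at hp
    by_cases hpre : old.isPrefixOf (c :: t)
    · rw [if_pos hpre] at hp
      cases w with
      | nil => exact List.nil_prefix
      | cons x w' =>
        exfalso
        cases new with
        | nil => simp at hnew
        | cons n0 ns =>
          rw [List.cons_append] at hp
          have heq := (List.cons_prefix_cons.mp hp).1
          have hx := hw x (by simp)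
          simp only [List.head?_cons, Option.some.injEq] at hnew
          rcases hnew with h | h <;> rw [h] at heq <;> simp [heq] at hx
    · rw [if_neg hpre] at hp
      cases w with
      | nil => exact List.nil_prefix
      | cons x w' =>
        obtain ⟨rfl, hp'⟩ := List.cons_prefix_cons.mp hp
        exact List.cons_prefix_cons.mpr ⟨rfl, ih w' (fun y hy => hw y (by simp [hy])) hp'⟩

theorem pvDigit_ext :
    ∀ (a b v : List Char), a.all PySem.Chars.isdigit → b.all PySem.Chars.isdigit →
      (a ++ ['}']) <+: (b ++ '}' :: v) → a = b := by
  intro a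
  induction a with
  | nil =>
    intro b v _ hb hp
    cases b with
    | nil => rfl
    | cons x b' =>
      exfalso
      simp only [List.nil_append, List.cons_append] at hp
      obtain ⟨h, -⟩ := List.cons_prefix_cons.mp hp
      simp [List.all_cons] at hb
      rw [← h] at hb
      exact absurd hb.1 (by decide)
  | cons x a' ih =>
    intro b v ha hb hp
    cases b with
    | nil =>
      exfalso
      simp only [List.cons_append, List.nil_append] at hp
      obtain ⟨h, -⟩ := List.cons_prefix_cons.mp hp
      simp [List.all_cons] at ha
      rw [h] at ha
      exact absurd ha.1 (by decide)
    | cons y b' =>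
      simp only [List.cons_append] at hp
      obtain ⟨rfl, hp'⟩ := List.cons_prefix_cons.mp hp
      simp only [List.all_cons, Bool.and_eq_true] at ha hb
      rw [ih b' v ha.2 hb.2 hp']

theorem pvIsdigit_ne (c : Char) (h : PySem.Chars.isdigit c = true) :
    c ≠ '{' ∧ c ≠ '$' ∧ c ≠ '?' := by
  refine ⟨?_, ?_, ?_⟩ <;> (rintro rfl; revert h; decide)

def pvTok (k : Int) : List Char := '{' :: 'p' :: PySem.Int.toChars k ++ ['}']

def pvMk (pg : Bool) (k : Int) : List Char := if pg then '$' :: PySem.Int.toChars k else ['?']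

theorem pvRep_skip (j : Int) (nu ds v : List Char)
    (hds : ds.all PySem.Chars.isdigit) (hdig : (PySem.Int.toChars j).all PySem.Chars.isdigit)
    (hne : PySem.Int.toChars j ≠ ds) :
    pvRep (pvTok j) nu ('{' :: 'p' :: (ds ++ '}' :: v)) =
      '{' :: 'p' :: (ds ++ '}' :: pvRep (pvTok j) nu v) := by
  have h1 : ¬ pvTok j <+: ('{' :: 'p' :: (ds ++ '}' :: v)) := by
    intro hp
    unfold pvTok at hp
    obtain ⟨-, hp⟩ := List.cons_prefix_cons.mp hp
    obtain ⟨-, hp⟩ := List.cons_prefix_cons.mp hp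
    exact hne (pvDigit_ext _ _ _ hdig hds hp)
  rw [pvRep_cons_not _ _ _ _ h1]
  have h2 : pvRep (pvTok j) nu ('p' :: (ds ++ '}' :: v)) =
      ('p' :: (ds ++ ['}'])) ++ pvRep (pvTok j) nu v := by
    have := pvRep_peel (pvTok j) nu (by simp [pvTok]) ('p' :: (ds ++ ['}'])) v
      (by
        intro x hx
        simp only [List.mem_cons, List.mem_append, List.not_mem_nil, or_false] at hx
        rcases hx with rfl | hx | rfl
        · decide
        · exact (pvIsdigit_ne x (by simpa using List.all_eq_true.mp hds x hx)).1
        · decide)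
    simpa using this
  rw [h2]
  simp

theorem pvFold_peel (pg : Bool) (L : List Int) (u : List Char) (Q : List Char → Prop)
    (H1 : ∀ j ∈ L, ∀ v, Q v → pvRep (pvTok j) (pvMk pg j) (u ++ v) = u ++ pvRep (pvTok j) (pvMk pg j) v)
    (H2 : ∀ j ∈ L, ∀ v, Q v → Q (pvRep (pvTok j) (pvMk pg j) v)) :
    ∀ v, Q v →
      List.foldl (fun r k => pvRep (pvTok k) (pvMk pg k) r) (u ++ v) L =
        u ++ List.foldl (fun r k => pvRep (pvTok k) (pvMk pg k) r) v L := by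
  induction L with
  | nil => intro v _; rfl
  | cons j L' ih =>
    intro v hv
    simp only [List.foldl_cons]
    rw [H1 j (by simp) v hv]
    exact ih (fun k hk => H1 k (by simp [hk])) (fun k hk => H2 k (by simp [hk]))
      _ (H2 j (by simp) v hv)

theorem pvFold_nil (pg : Bool) (L : List Int) :
    List.foldl (fun r k => pvRep (pvTok k) (pvMk pg k) r) [] L = [] := by
  induction L with
  | nil => rfl
  | cons j L' ih => simpa [pvRep] using ih

theorem pvMk_head (pg : Bool) (k : Int) :
    (pvMk pg k).head? = some '$' ∨ (pvMk pg k).head? = some '?' := by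
  cases pg <;> simp [pvMk]

theorem pvDigit_facts :
    ∀ j ∈ PySem.List.pyRange 1 21 1,
      (PySem.Int.toChars j).all PySem.Chars.isdigit = true ∧ PySem.Int.toChars j ≠ [] := by
  decide

theorem pvInj :
    ∀ j ∈ PySem.List.pyRange 1 21 1, ∀ k ∈ PySem.List.pyRange 1 21 1,
      PySem.Int.toChars j = PySem.Int.toChars k → j = k := by
  decide

theorem pvTakeWhile_all (a : List Char) (b : Char) (v : List Char)
    (ha : a.all PySem.Chars.isdigit = true) (hb : PySem.Chars.isdigit b = false) :
    (a ++ b :: v).takeWhile PySem.Chars.isdigit = a := by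
  induction a with
  | nil => simp [hb]
  | cons x a' ih =>
    simp only [List.all_cons, Bool.and_eq_true] at ha
    simp [ha.1, ih ha.2]

theorem pvScanB_cons_plain (pg : Bool) (c : Char) (t : List Char)
    (h : ¬ (c = '{' ∧ t.head? = some 'p')) :
    scanB pg (c :: t) = c :: scanB pg t := by
  rw [scanB]
  simp only [if_neg h]

theorem pvScanB_group (pg : Bool) (ds rest : List Char)
    (hds : ds ≠ []) (hall : ds.all PySem.Chars.isdigit = true) :
    scanB pg ('{' :: 'p' :: (ds ++ '}' :: rest)) =
      (if ds ∈ (PySem.List.pyRange 1 21 1).map PySem.Int.toChars then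
         (if pg then '$' :: ds else ['?'])
       else '{' :: 'p' :: (ds ++ ['}'])) ++ scanB pg rest := by
  have hb : PySem.Chars.isdigit '}' = false := by decide
  have htw : (ds ++ '}' :: rest).takeWhile PySem.Chars.isdigit = ds :=
    pvTakeWhile_all ds '}' rest hall hb
  have hdrop : (ds ++ '}' :: rest).drop ds.length = '}' :: rest := List.drop_left
  rw [scanB]
  simp only [List.tail_cons, htw, hdrop, List.head?_cons, List.tail_cons]
  rw [if_pos (by simp), if_pos (by simp [hds])]

theorem pvScanB_fail (pg : Bool) (r : List Char)
    (h2 : ¬ ((r.takeWhile PySem.Chars.isdigit) ≠ [] ∧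
        ((r.drop (r.takeWhile PySem.Chars.isdigit).length).head? = some '}'))) :
    scanB pg ('{' :: 'p' :: r) = '{' :: scanB pg ('p' :: r) := by
  rw [scanB]
  simp only [List.tail_cons, List.head?_cons]
  rw [if_pos (by simp), if_neg h2]

theorem pvTok_not_prefix_of_head (j : Int) (c : Char) (v : List Char) (hc : c ≠ '{') :
    ¬ pvTok j <+: (c :: v) := by
  intro hp
  exact hc ((List.cons_prefix_cons.mp hp).1).symm

theorem pvTok_prefix_brace (j : Int) (v : List Char)
    (hp : pvTok j <+: ('{' :: v)) :
    ('p' :: (PySem.Int.toChars j ++ ['}'])) <+: v := by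
  unfold pvTok at hp
  exact (List.cons_prefix_cons.mp hp).2

theorem pvMk_no_brace (pg : Bool) (k : Int)
    (hk : k ∈ PySem.List.pyRange 1 21 1) : ∀ x ∈ pvMk pg k, x ≠ '{' := by
  intro x hx
  cases pg with
  | false =>
    simp [pvMk] at hx
    subst hx; decide
  | true =>
    simp [pvMk] at hx
    rcases hx with hx | hx
    · subst hx; decide
    · exact (pvIsdigit_ne x (by
        simpa using List.all_eq_true.mp (pvDigit_facts k hk).1 x hx)).1

theorem pvMainAux (pg : Bool) :
    ∀ (n : Nat) (s : List Char), s.length ≤ n →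
      List.foldl (fun r k => pvRep (pvTok k) (pvMk pg k) r) s (PySem.List.pyRange 1 21 1) =
        scanB pg s := by
  intro n
  induction n with
  | zero =>
    intro s hs
    have : s = [] := by cases s <;> simp_all
    subst this
    rw [pvFold_nil, scanB]
  | succ n ih =>
    intro s hs
    cases s with
    | nil => rw [pvFold_nil, scanB]
    | cons c t =>
      simp only [List.length_cons] at hs
      by_cases h1 : c = '{' ∧ t.head? = some 'p'
      · obtain ⟨rfl, hhd⟩ := h1
        cases t with
        | nil => simp at hhd
        | cons p0 r =>
          simp only [List.head?_cons, Option.some.injEq] at hhd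
          subst hhd
          simp only [List.length_cons] at hs
          by_cases h2 : (r.takeWhile PySem.Chars.isdigit) ≠ [] ∧
              ((r.drop (r.takeWhile PySem.Chars.isdigit).length).head? = some '}')
          · -- a complete "{p<digits>}" group starts here
            obtain ⟨hne, hhd2⟩ := h2
            obtain ⟨w, hw⟩ := (List.takeWhile_prefix PySem.Chars.isdigit : r.takeWhile PySem.Chars.isdigit <+: r)
            set ds := r.takeWhile PySem.Chars.isdigit with hdsdef
            have hdrop : r.drop ds.length = w := by rw [← hw]; exact List.drop_left
            rw [hdrop] at hhd2
            cases w with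
            | nil => simp at hhd2
            | cons y rest =>
              simp only [List.head?_cons, Option.some.injEq] at hhd2
              subst hhd2
              have hall : ds.all PySem.Chars.isdigit = true := by
                rw [List.all_eq_true]
                intro x hx
                exact List.mem_takeWhile_imp hx
              have hrest_len : rest.length ≤ n := by
                have hr : r.length = ds.length + (1 + rest.length) := by
                  rw [← hw]; simp; omega
                have hds1 : 0 < ds.length := List.length_pos_of_ne_nil hne
                omega
              rw [← hw]
              rw [pvScanB_group pg ds rest hne hall]
              by_cases h3 : ds ∈ (PySem.List.pyRange 1 21 1).map PySem.Int.toChars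
              · -- a live placeholder: the k₀-th pass replaces it, the others skip it
                rw [if_pos h3]
                obtain ⟨k0, hk0L, hk0⟩ := List.mem_map.mp h3
                obtain ⟨L₁, L₂, hL⟩ := List.append_of_mem hk0L
                have hnd : (PySem.List.pyRange 1 21 1).Nodup := by decide
                have hndL := hL ▸ hnd
                have hk0n1 : k0 ∉ L₁ := by
                  have hd := (List.nodup_append.mp hndL).2.2
                  intro hmem
                  exact hd k0 hmem k0 (by simp) rfl
                have hk0n2 : k0 ∉ L₂ :=
                  (List.nodup_cons.mp (List.Nodup.of_append_right hndL)).1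
                have hne1 : ∀ j ∈ L₁, PySem.Int.toChars j ≠ ds := by
                  intro j hj he
                  have hjL : j ∈ PySem.List.pyRange 1 21 1 := hL ▸ List.mem_append_left _ hj
                  have : j = k0 := pvInj j hjL k0 hk0L (by rw [he, hk0])
                  exact hk0n1 (this ▸ hj)
                have hne2 : ∀ j ∈ L₂, PySem.Int.toChars j ≠ ds := by
                  intro j hj he
                  have hjL : j ∈ PySem.List.pyRange 1 21 1 := hL ▸
                    List.mem_append_right _ (by simp [hj])
                  have : j = k0 := pvInj j hjL k0 hk0L (by rw [he, hk0])
                  exact hk0n2 (this ▸ hj)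
                rw [hL, List.foldl_append]
                have hpeel1 := pvFold_peel pg L₁ ('{' :: 'p' :: (ds ++ ['}'])) (fun _ => True)
                  (by
                    intro j hj v _
                    have hjL : j ∈ PySem.List.pyRange 1 21 1 := hL ▸ List.mem_append_left _ hj
                    have := pvRep_skip j (pvMk pg j) ds v hall (pvDigit_facts j hjL).1 (hne1 j hj)
                    simpa using this)
                  (by intro j hj v _; trivial) rest trivial
                have halign : ('{' :: 'p' :: (ds ++ ['}'])) ++ rest = '{' :: 'p' :: (ds ++ '}' :: rest) := by simp
                rw [← halign, hpeel1, List.foldl_cons]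
                have hu : ('{' :: 'p' :: (ds ++ ['}'])) = pvTok k0 := by simp [pvTok, hk0]
                rw [hu, pvRep_match _ _ _ (by simp [pvTok])]
                have hpeel2 := pvFold_peel pg L₂ (pvMk pg k0) (fun _ => True)
                  (by
                    intro j hj v _
                    exact pvRep_peel (pvTok j) (pvMk pg j) (by simp [pvTok]) (pvMk pg k0) v
                      (pvMk_no_brace pg k0 hk0L))
                  (by intro j hj v _; trivial)
                  (pvRep (pvTok k0) (pvMk pg k0) (List.foldl (fun r k => pvRep (pvTok k) (pvMk pg k) r) rest L₁)) trivial
                rw [hpeel2]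
                have hfin : List.foldl (fun r k => pvRep (pvTok k) (pvMk pg k) r)
                    (pvRep (pvTok k0) (pvMk pg k0) (List.foldl (fun r k => pvRep (pvTok k) (pvMk pg k) r) rest L₁)) L₂
                    = scanB pg rest := by
                  rw [← ih rest hrest_len, hL, List.foldl_append, List.foldl_cons]
                rw [hfin]
                cases pg <;> simp [pvMk, hk0]
              · -- dead group "{p…}": every pass skips it
                rw [if_neg h3]
                have hne0 : ∀ j ∈ PySem.List.pyRange 1 21 1, PySem.Int.toChars j ≠ ds := by
                  intro j hj he
                  exact h3 (List.mem_map.mpr ⟨j, hj, he⟩)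
                have hpeel := pvFold_peel pg (PySem.List.pyRange 1 21 1)
                  ('{' :: 'p' :: (ds ++ ['}'])) (fun _ => True)
                  (by
                    intro j hj v _
                    have := pvRep_skip j (pvMk pg j) ds v hall (pvDigit_facts j hj).1 (hne0 j hj)
                    simpa using this)
                  (by intro j hj v _; trivial) rest trivial
                have halign : ('{' :: 'p' :: (ds ++ ['}'])) ++ rest = '{' :: 'p' :: (ds ++ '}' :: rest) := by simp
                rw [← halign, hpeel, ih rest hrest_len]
          · -- no group: emit '{' and rescan from 'p'
            have hQ0 : ∀ j ∈ PySem.List.pyRange 1 21 1,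
                ¬ ('p' :: (PySem.Int.toChars j ++ ['}'])) <+: ('p' :: r) := by
              intro j hj hp
              obtain ⟨-, hp⟩ := List.cons_prefix_cons.mp hp
              obtain ⟨w, hw⟩ := hp
              obtain ⟨hdig, hne⟩ := pvDigit_facts j hj
              have : r = PySem.Int.toChars j ++ '}' :: w := by rw [← hw]; simp
              apply h2
              rw [this, pvTakeWhile_all _ _ _ hdig (by decide)]
              refine ⟨hne, ?_⟩
              rw [List.drop_left]
              simp
            have hpeel := pvFold_peel pg (PySem.List.pyRange 1 21 1) ['{']
              (fun v => ∀ j ∈ PySem.List.pyRange 1 21 1,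
                ¬ ('p' :: (PySem.Int.toChars j ++ ['}'])) <+: v)
              (by
                intro j hj v hQ
                exact pvRep_cons_not _ _ _ _ (fun hp => hQ j hj (pvTok_prefix_brace j v hp)))
              (by
                intro j hj v hQ k hk hp
                refine hQ k hk (pvRep_prefix_rev (pvTok j) (pvMk pg j) (pvMk_head pg j) v _ ?_ hp)
                intro x hx
                simp only [List.mem_cons, List.mem_append, List.not_mem_nil, or_false] at hx
                rcases hx with rfl | hx | rfl
                · exact ⟨by decide, by decide⟩
                · exact ((pvIsdigit_ne x (by
                    simpa using List.all_eq_true.mp (pvDigit_facts k hk).1 x hx)).2)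
                · exact ⟨by decide, by decide⟩)
              ('p' :: r) hQ0
            simp only [List.singleton_append] at hpeel
            rw [hpeel, ih ('p' :: r) (by simp; omega), pvScanB_fail pg r h2]
      · by_cases hc : c = '{'
        · subst hc
          have hQ0 : t.head? ≠ some 'p' := fun h => h1 ⟨rfl, h⟩
          have hpeel := pvFold_peel pg (PySem.List.pyRange 1 21 1) ['{']
            (fun v => v.head? ≠ some 'p')
            (by
              intro j hj v hQ
              refine pvRep_cons_not _ _ _ _ (fun hp => ?_)
              have := pvTok_prefix_brace j v hp
              cases v with
              | nil => simp at this
              | cons x v' => exact hQ (by simp [(List.cons_prefix_cons.mp this).1.symm]))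
            (by
              intro j hj v hQ hp
              have : ['p'] <+: pvRep (pvTok j) (pvMk pg j) v := by
                cases hrep : pvRep (pvTok j) (pvMk pg j) v with
                | nil => rw [hrep] at hp; simp at hp
                | cons x v' =>
                  rw [hrep] at hp
                  simp only [List.head?_cons, Option.some.injEq] at hp
                  exact List.cons_prefix_cons.mpr ⟨hp.symm, List.nil_prefix⟩
              have := pvRep_prefix_rev (pvTok j) (pvMk pg j) (pvMk_head pg j) v ['p']
                (by intro x hx; simp at hx; subst hx; exact ⟨by decide, by decide⟩) this
              cases v with
              | nil => simp at this
              | cons x v' => exact hQ (by simp [(List.cons_prefix_cons.mp this).1.symm]))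
            t hQ0
          simp only [List.singleton_append] at hpeel
          rw [hpeel, ih t (by omega), pvScanB_cons_plain pg '{' t h1]
        · have hpeel := pvFold_peel pg (PySem.List.pyRange 1 21 1) [c]
            (fun _ => True)
            (by
              intro j hj v _
              exact pvRep_cons_not _ _ _ _ (pvTok_not_prefix_of_head j c v hc))
            (by intro j hj v _; trivial)
            t trivial
          simp only [List.singleton_append] at hpeel
          rw [hpeel, ih t (by omega), pvScanB_cons_plain pg c t h1]

theorem pvFoldStr (f g : Int → String) :
    ∀ (L : List Int) (s : String),
      (List.foldl (fun r k => PySem.Str.replace r (f k) (g k)) s L).toList =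
        List.foldl (fun l k => PySem.Chars.replace l (f k).toList (g k).toList) s.toList L := by
  intro L
  induction L with
  | nil => intro s; rfl
  | cons j L' ih =>
    intro s
    simp only [List.foldl_cons]
    rw [ih, PySem.Str.toList_replace]

theorem pvFoldChars (pg : Bool) :
    ∀ (L : List Int) (l : List Char),
      List.foldl (fun l k => PySem.Chars.replace l (pvTok k) (pvMk pg k)) l L =
        List.foldl (fun r k => pvRep (pvTok k) (pvMk pg k) r) l L := by
  intro L
  induction L with
  | nil => intro l; rfl
  | cons j L' ih =>
    intro l
    simp only [List.foldl_cons]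
    rw [replace_eq_pvRep _ _ _ (by simp [pvTok]), ih]

theorem pv_final (sql backend : String) :
    (if backend = "postgres" then
      List.foldl (fun rendered idx =>
          PySem.Str.replace rendered
            (String.ofList ('{' :: 'p' :: PySem.Int.toChars idx ++ ['}']))
            (String.ofList ('$' :: PySem.Int.toChars idx)))
        sql (PySem.List.pyRange 1 21 1)
    else
      List.foldl (fun rendered idx =>
          PySem.Str.replace rendered
            (String.ofList ('{' :: 'p' :: PySem.Int.toChars idx ++ ['}']))
            "?")
        sql (PySem.List.pyRange 1 21 1)) =
    String.ofList (scanB (backend == "postgres") sql.toList) := by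
  by_cases hb : backend = "postgres"
  · rw [if_pos hb, hb]
    apply String.toList_injective
    rw [pvFoldStr (fun idx => String.ofList ('{' :: 'p' :: PySem.Int.toChars idx ++ ['}']))
        (fun idx => String.ofList ('$' :: PySem.Int.toChars idx))]
    have hc : List.foldl (fun l k => PySem.Chars.replace l
          (String.ofList ('{' :: 'p' :: PySem.Int.toChars k ++ ['}'])).toList
          (String.ofList ('$' :: PySem.Int.toChars k)).toList) sql.toList (PySem.List.pyRange 1 21 1) =
        List.foldl (fun l k => PySem.Chars.replace l (pvTok k) (pvMk true k)) sql.toList (PySem.List.pyRange 1 21 1) := by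
      simp [pvTok, pvMk]
    rw [hc, pvFoldChars, pvMainAux true sql.toList.length sql.toList le_rfl]
    simp
  · rw [if_neg hb]
    have hbb : (backend == "postgres") = false := by simpa using hb
    rw [hbb]
    apply String.toList_injective
    rw [pvFoldStr (fun idx => String.ofList ('{' :: 'p' :: PySem.Int.toChars idx ++ ['}']))
        (fun _ => "?")]
    have hc : List.foldl (fun l k => PySem.Chars.replace l
          (String.ofList ('{' :: 'p' :: PySem.Int.toChars k ++ ['}'])).toList
          ("?" : String).toList) sql.toList (PySem.List.pyRange 1 21 1) =
        List.foldl (fun l k => PySem.Chars.replace l (pvTok k) (pvMk false k)) sql.toList (PySem.List.pyRange 1 21 1) := by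
      simp [pvTok, pvMk]
    rw [hc, pvFoldChars, pvMainAux false sql.toList.length sql.toList le_rfl]
    simp

-- ===== VERDICT (by name: the statement is the Claim_ definition above) =====
theorem render_sql_py_spec : Claim_equal_render_sql_py := by
  intro sql backend _
  unfold Spec_render_sql_py render_sql_py render_sql_py_alt
  exact pv_final sql backend
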